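-- pv_equiv track=rewrite | github.com/christopherwebb/advent_code_2019 | day04/run.py | matches2
-- ===== SOURCE A (Python) =====
-- def matches2(selection):
--     groups = []
--     for selec in selection:
--         if groups and selec < groups[-1][0]:
--             return False
--
--         if groups and groups[-1][0] == selec:
--             groups[-1].append(selec)
--         else:
--             groups.append([selec])
--
--     return bool([x for x in groups if len(x) == 2])
-- ===== SOURCE B (Python) =====
-- def matches2(selection):
--     L = list(selection)
--     if L != sorted(L):
--         return False
--     counts = {}
--     for x in L:
--         counts[x] = counts.get(x, 0) + 1
--     return any(c == 2 for c in counts.values())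
-- ===== Notes on version B (the rewrite author's own statement) =====
-- stated objective: simpler
-- what changed: A incrementally builds a list of runs with an early return and tests run lengths; B checks non-decreasingness by comparing against sorted(L) and then asks a one-pass frequency dict whether any value occurs exactly twice (equal to a run of length 2 in a sorted list).
import Mathlib
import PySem

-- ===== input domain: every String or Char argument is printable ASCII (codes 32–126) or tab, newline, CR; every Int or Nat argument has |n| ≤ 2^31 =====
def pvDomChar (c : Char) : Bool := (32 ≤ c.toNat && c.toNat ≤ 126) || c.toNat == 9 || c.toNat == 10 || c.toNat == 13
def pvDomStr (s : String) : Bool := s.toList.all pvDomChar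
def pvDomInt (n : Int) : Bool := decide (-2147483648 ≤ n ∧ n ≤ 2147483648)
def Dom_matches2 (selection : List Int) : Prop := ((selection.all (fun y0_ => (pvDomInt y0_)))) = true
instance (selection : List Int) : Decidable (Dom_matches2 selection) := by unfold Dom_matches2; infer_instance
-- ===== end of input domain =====

-- B replaces A's run-grouping loop (with early return) by a sorted-equality guard plus a
-- frequency dict built in one pass (objective: simpler).

-- ===== PORT A =====
-- A's loop: 'groups' is a list of runs; groups[-1] / groups[-1][0] are read with pyGetD
-- (A only reads them when groups is nonempty, and every group it builds is nonempty,
-- so the defaults never matter).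
def matchesLoopA : List Int → List (List Int) → Bool
  | [], groups => !(groups.filter (fun x => x.length == 2)).isEmpty
  | selec :: rest, groups =>
    if !groups.isEmpty && decide (selec < PySem.List.pyGetD (PySem.List.pyGetD groups (-1) []) 0 0) then
      false
    else if !groups.isEmpty && (PySem.List.pyGetD (PySem.List.pyGetD groups (-1) []) 0 0 == selec) then
      matchesLoopA rest (groups.dropLast ++ [PySem.List.pyGetD groups (-1) [] ++ [selec]])
    else
      matchesLoopA rest (groups ++ [[selec]])

def matches2 (selection : List Int) : Bool := matchesLoopA selection []

-- ===== PORT B =====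
def matches2_alt (selection : List Int) : Bool :=
  if PySem.List.sorted selection (fun x => x) false ≠ selection then false
  else
    (selection.foldl (fun d x => d.insert x (d.getD x 0 + 1)) (PySem.Dict.empty : PySem.Dict Int Int)).values.any
      (fun c => c == 2)

-- ===== PRECONDITION & SPEC =====
def Spec_matches2 (selection : List Int) (out : Bool) : Prop := out = matches2_alt selection
instance (selection : List Int) (out : Bool) : Decidable (Spec_matches2 selection out) := by unfold Spec_matches2; infer_instance

-- ===== CLAIM (what is proved, stated in full; the proofs are below) =====
def Claim_equal_matches2 : Prop := ∀ (selection : List Int), Dom_matches2 selection → Spec_matches2 selection (matches2 selection)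

-- ===== LEMMAS AND PROOFS =====

-- Abstraction of A's loop state: current run value v, its length n, and whether a frozen
-- group of length exactly 2 already exists.
def stepA : List Int → Int → Nat → Bool → Bool
  | [], _, n, b => b || (n == 2)
  | s :: rest, v, n, b =>
    if s < v then false
    else if s = v then stepA rest v (n + 1) b
    else stepA rest s 1 (b || (n == 2))

lemma filt_append (frozen : List (List Int)) (n : Nat) (v : Int) :
    (!((frozen ++ [List.replicate n v]).filter (fun g => g.length == 2)).isEmpty)
      = ((!(frozen.filter (fun g => g.length == 2)).isEmpty) || (n == 2)) := by
  by_cases h : n = 2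
  · simp [List.filter_append, h]
  · simp [List.filter_append, h]

lemma loopA_eq_stepA (rest : List Int) : ∀ (frozen : List (List Int)) (v : Int) (n : Nat), 1 ≤ n →
    matchesLoopA rest (frozen ++ [List.replicate n v]) =
      stepA rest v n (!(frozen.filter (fun g => g.length == 2)).isEmpty) := by
  induction rest with
  | nil =>
    intro frozen v n hn
    simp only [matchesLoopA, stepA]
    exact filt_append frozen n v
  | cons s rest ih =>
    intro frozen v n hn
    rw [matchesLoopA]
    have hget : PySem.List.pyGetD (frozen ++ [List.replicate n v]) (-1) ([] : List Int)
        = List.replicate n v := PySem.List.pyGetD_neg_one_append_singleton _ _ _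
    have hhead : PySem.List.pyGetD (List.replicate n v) 0 0 = v := by
      obtain ⟨m, rfl⟩ : ∃ m, n = m + 1 := ⟨n - 1, by omega⟩
      simp [List.replicate_succ, PySem.List.pyGetD_zero_cons]
    have hne : ((frozen ++ [List.replicate n v]).isEmpty) = false := by simp
    rw [hget, hhead, hne]
    simp only [Bool.not_false, Bool.true_and]
    by_cases hlt : s < v
    · simp [stepA, hlt]
    · rw [if_neg (by simp [hlt])]
      by_cases heq : v = s
      · subst heq
        rw [if_pos (by simp)]
        rw [List.dropLast_concat, ← List.replicate_succ']
        rw [ih frozen v (n + 1) (by omega)]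
        simp [stepA]
      · rw [if_neg (by simp [heq])]
        have h2 := ih (frozen ++ [List.replicate n v]) s 1 (by omega)
        rw [show ([[s]] : List (List Int)) = [List.replicate 1 s] from rfl, h2, filt_append]
        rw [stepA, if_neg hlt, if_neg (fun h => heq h.symm)]

lemma not_pairwise_tail {v s : Int} {rest : List Int}
    (h : ¬ (v :: s :: rest).Pairwise (· ≤ ·)) (hvs : v ≤ s) :
    ¬ (s :: rest).Pairwise (· ≤ ·) := by
  intro hp
  apply h
  rw [List.pairwise_cons]
  refine ⟨?_, hp⟩
  intro w hw
  rcases List.mem_cons.mp hw with rfl | hw'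
  · exact hvs
  · exact le_trans hvs ((List.pairwise_cons.mp hp).1 w hw')

lemma stepA_not_pairwise (rest : List Int) : ∀ (v : Int) (n : Nat) (b : Bool),
    ¬ (v :: rest).Pairwise (· ≤ ·) → stepA rest v n b = false := by
  induction rest with
  | nil => intro v n b h; exact absurd (List.pairwise_singleton _ v) h
  | cons s rest ih =>
    intro v n b h
    by_cases hlt : s < v
    · simp [stepA, hlt]
    · have hvs : v ≤ s := by omega
      have hch := not_pairwise_tail h hvs
      by_cases heq : s = v
      · subst heq; rw [stepA, if_neg hlt, if_pos rfl]; exact ih s (n + 1) b hch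
      · rw [stepA, if_neg hlt, if_neg heq]; exact ih s 1 (b || (n == 2)) hch

lemma exists_count_cons (s : Int) (rest : List Int) :
    (∃ k ∈ s :: rest, (s :: rest).count k = 2) ↔
      (1 + rest.count s = 2 ∨ ∃ w ∈ rest, w ≠ s ∧ rest.count w = 2) := by
  constructor
  · rintro ⟨k, hk, hc⟩
    by_cases hks : k = s
    · subst hks; left; rw [List.count_cons_self] at hc; omega
    · right
      refine ⟨k, ?_, hks, ?_⟩
      · rcases List.mem_cons.mp hk with h | h
        · exact absurd h hks
        · exact h
      · rwa [List.count_cons_of_ne (Ne.symm hks)] at hc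
  · rintro (hc | ⟨w, hw, hne, hcw⟩)
    · exact ⟨s, List.mem_cons_self .., by rw [List.count_cons_self]; omega⟩
    · exact ⟨w, List.mem_cons_of_mem _ hw, by rwa [List.count_cons_of_ne (Ne.symm hne)]⟩

lemma stepA_pairwise (rest : List Int) : ∀ (v : Int) (n : Nat) (b : Bool),
    (v :: rest).Pairwise (· ≤ ·) →
    (stepA rest v n b = true ↔
      b = true ∨ n + rest.count v = 2 ∨ ∃ w ∈ rest, w ≠ v ∧ rest.count w = 2) := by
  induction rest with
  | nil => intro v n b h; simp [stepA]
  | cons s rest ih =>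
    intro v n b h
    have hvs : v ≤ s := (List.pairwise_cons.mp h).1 s List.mem_cons_self
    have hpw : (s :: rest).Pairwise (· ≤ ·) := (List.pairwise_cons.mp h).2
    have hs_le : ∀ w ∈ rest, s ≤ w := (List.pairwise_cons.mp hpw).1
    have hlt : ¬ s < v := by omega
    by_cases heq : s = v
    · subst heq
      rw [stepA, if_neg hlt, if_pos rfl, ih s (n + 1) b hpw]
      have hcnt : (s :: rest).count s = rest.count s + 1 := List.count_cons_self
      constructor
      · rintro (hb | hc | ⟨w, hw, hne, hcw⟩)
        · exact Or.inl hb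
        · exact Or.inr (Or.inl (by rw [hcnt]; omega))
        · exact Or.inr (Or.inr ⟨w, List.mem_cons_of_mem _ hw, hne,
            by rwa [List.count_cons_of_ne (Ne.symm hne)]⟩)
      · rintro (hb | hc | ⟨w, hw, hne, hcw⟩)
        · exact Or.inl hb
        · rw [hcnt] at hc; exact Or.inr (Or.inl (by omega))
        · rcases List.mem_cons.mp hw with rfl | hw'
          · exact absurd rfl hne
          · exact Or.inr (Or.inr ⟨w, hw', hne,
              by rwa [List.count_cons_of_ne (Ne.symm hne)] at hcw⟩)
    · have hgt : v < s := by omega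
      have hvnot : ∀ w ∈ s :: rest, v < w := by
        intro w hw
        rcases List.mem_cons.mp hw with rfl | hw'
        · exact hgt
        · exact lt_of_lt_of_le hgt (hs_le w hw')
      rw [stepA, if_neg hlt, if_neg heq, ih s 1 (b || (n == 2)) hpw]
      have hcv : (s :: rest).count v = 0 := by
        rw [List.count_eq_zero]
        intro hmem
        exact absurd rfl (ne_of_gt (hvnot v hmem)).symm
      have hex := exists_count_cons s rest
      constructor
      · rintro (hb | hc | ⟨w, hw, hne, hcw⟩)
        · rcases Bool.or_eq_true_iff.mp hb with hb' | hn
          · exact Or.inl hb'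
          · refine Or.inr (Or.inl ?_)
            rw [hcv]
            have : n = 2 := by simpa using hn
            omega
        · refine Or.inr (Or.inr ⟨s, List.mem_cons_self .., ne_of_gt hgt, ?_⟩)
          rw [List.count_cons_self]; omega
        · exact Or.inr (Or.inr ⟨w, List.mem_cons_of_mem _ hw,
            ne_of_gt (hvnot w (List.mem_cons_of_mem _ hw)),
            by rwa [List.count_cons_of_ne (Ne.symm hne)]⟩)
      · rintro (hb | hc | ⟨w, hw, hne, hcw⟩)
        · exact Or.inl (by simp [hb])
        · rw [hcv] at hc
          refine Or.inl ?_
          have : n = 2 := by omega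
          simp [this]
        · have : ∃ k ∈ s :: rest, (s :: rest).count k = 2 := ⟨w, hw, hcw⟩
          rcases hex.mp this with h1 | ⟨u, hu, hus, hcu⟩
          · exact Or.inr (Or.inl (by omega))
          · exact Or.inr (Or.inr ⟨u, hu, hus, hcu⟩)

-- B's value, characterised
lemma alt_char (selection : List Int) :
    matches2_alt selection = true ↔
      selection.Pairwise (· ≤ ·) ∧ ∃ k ∈ selection, selection.count k = 2 := by
  unfold matches2_alt
  rw [PySem.Dict.foldl_insert_getD_add_one_eq_counter]
  by_cases hp : selection.Pairwise (· ≤ ·)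
  · have hs : PySem.List.sorted selection (fun x => x) false = selection :=
      PySem.List.sorted_eq_self_of_pairwise selection (fun x => x) hp
    rw [if_neg (by simp [hs])]
    rw [PySem.Dict.values_eq_map_keys _ (PySem.Dict.nodup_keys_counter selection) 0]
    simp only [List.any_map, List.any_eq_true, Function.comp]
    constructor
    · rintro ⟨k, hk, hc⟩
      have hk' : k ∈ selection := (PySem.Set.mem_ofList selection k).mp
        (by rwa [PySem.Dict.keys_counter] at hk)
      refine ⟨hp, k, hk', ?_⟩
      rw [PySem.Dict.getD_counter] at hc
      have h2 : (selection.count k : Int) = 2 := by simpa using hc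
      exact_mod_cast h2
    · rintro ⟨_, k, hk, hc⟩
      refine ⟨k, ?_, ?_⟩
      · rw [PySem.Dict.keys_counter]
        exact (PySem.Set.mem_ofList selection k).mpr hk
      · rw [PySem.Dict.getD_counter]
        simp [hc]
  · rw [if_pos ?_]
    · simp [hp]
    · intro hs
      exact hp (by
        rw [← hs]
        exact PySem.List.sorted_pairwise selection (fun x => x))

-- ===== VERDICT (by name: the statement is the Claim_ definition above) =====
theorem matches2_spec : Claim_equal_matches2 := by
  intro selection _
  unfold Spec_matches2
  cases selection with
  | nil => decide
  | cons s rest =>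
    have hA : matches2 (s :: rest) = stepA rest s 1 false := by
      unfold matches2
      rw [matchesLoopA]
      simp only [List.isEmpty_nil, Bool.not_true, Bool.false_and, Bool.false_eq_true, if_false]
      have := loopA_eq_stepA rest [] s 1 (by omega)
      simpa using this
    rw [hA]
    by_cases hpw : (s :: rest).Pairwise (· ≤ ·)
    · have hB := alt_char (s :: rest)
      have hAiff := stepA_pairwise rest s 1 false hpw
      cases hab : matches2_alt (s :: rest) with
      | true =>
        rcases (hB.mp hab).2 with ⟨k, hk, hc⟩
        rcases (exists_count_cons s rest).mp ⟨k, hk, hc⟩ with h1 | ⟨w, hw, hne, hcw⟩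
        · exact hAiff.mpr (Or.inr (Or.inl (by omega)))
        · exact hAiff.mpr (Or.inr (Or.inr ⟨w, hw, hne, hcw⟩))
      | false =>
        refine Bool.eq_false_iff.mpr ?_
        intro ht
        rcases hAiff.mp ht with hf | hc | ⟨w, hw, hne, hcw⟩
        · exact absurd hf (by simp)
        · have : matches2_alt (s :: rest) = true :=
            hB.mpr ⟨hpw, (exists_count_cons s rest).mpr (Or.inl (by omega))⟩
          rw [hab] at this; exact absurd this (by simp)
        · have : matches2_alt (s :: rest) = true :=
            hB.mpr ⟨hpw, (exists_count_cons s rest).mpr (Or.inr ⟨w, hw, hne, hcw⟩)⟩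
          rw [hab] at this; exact absurd this (by simp)
    · rw [stepA_not_pairwise rest s 1 false hpw]
      have : ¬ matches2_alt (s :: rest) = true := by
        rw [alt_char]
        rintro ⟨hp, _⟩
        exact hpw hp
      exact (Bool.eq_false_iff.mpr this).symm
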